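-- pv_equiv track=rewrite | github.com/eaglesearcher/advent-of-code-2022 | day22.py | read_instructions
-- ===== SOURCE A (Python) =====
-- def read_instructions(instructions):
--     # turn this into a csv by inserting commas before letters, because it's easier to parse that way
--     num_chars = len(instructions)
--     new_list = ['R']  # we're starting with a R to maintain consistency -- Turn then number (need to pre-turn left)
--     for char_i in range(0, num_chars):
--         if instructions[char_i] == 'R' or instructions[char_i] == 'L':
--             new_list.append(',')
--         new_list.append(instructions[char_i])
--     new_list = ''.join(new_list)
--     instruction_list = new_list.split(',')
--     return instruction_list
-- ===== SOURCE B (Python) =====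
-- def read_instructions(instructions):
--     # Single pass: build the token list directly, no sentinel/join/split over
--     # the whole string.  'R'/'L' start a new token holding the letter; ','
--     # (the csv delimiter A's format uses) starts a fresh token; anything else
--     # extends the current (last) token.  Seeded with 'R' like A (pre-turn).
--     tokens = [['R']]
--     for char in instructions:
--         if char == 'R' or char == 'L':
--             tokens.append([char])
--         elif char == ',':
--             tokens.append([])
--         else:
--             tokens[-1].append(char)
--     return [''.join(t) for t in tokens]
-- ===== Notes on version B (the rewrite author's own statement) =====
-- stated objective: simpler
-- what changed: B builds the token list directly in one pass (a new token on 'R'/'L', a fresh token on the ',' delimiter, otherwise extend the last token), dropping A's comma-sentinel buffer, ''.join and second-pass split.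
import Mathlib
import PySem

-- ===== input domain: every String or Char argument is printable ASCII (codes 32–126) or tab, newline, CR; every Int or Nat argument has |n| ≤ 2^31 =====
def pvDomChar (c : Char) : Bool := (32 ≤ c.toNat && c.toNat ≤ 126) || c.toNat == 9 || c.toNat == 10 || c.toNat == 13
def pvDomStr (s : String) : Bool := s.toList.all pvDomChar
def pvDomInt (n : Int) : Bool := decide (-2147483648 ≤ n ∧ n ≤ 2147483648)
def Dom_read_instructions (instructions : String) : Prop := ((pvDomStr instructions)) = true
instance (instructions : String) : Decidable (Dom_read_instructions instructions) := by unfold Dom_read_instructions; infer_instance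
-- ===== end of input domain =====

-- B builds the token list directly in one pass (no comma-sentinel buffer, no join, no second-pass split); objective: simpler.

-- ===== PORT A =====
-- A appends only single characters (',' and s[i]) to its buffer, so the buffer is a
-- List Char; ''.join(buffer) is then String.ofList, exact.
def read_instructions (instructions : String) : List String :=
  let num_chars := PySem.Str.len instructions
  let new_list : List Char :=
    (PySem.List.pyRange 0 num_chars 1).foldl
      (fun acc char_i =>
        -- instructions[char_i]; char_i ranges over 0..len-1 so the index is always in range
        let c := PySem.List.pyGetD instructions.toList char_i ' '
        (if c == 'R' || c == 'L' then acc ++ [','] else acc) ++ [c])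
      ['R']
  -- new_list.split(',') with sep "," ≠ "" never raises, so split? is always some
  (PySem.Str.split? (String.ofList new_list) ",").getD []

-- ===== PORT B =====
-- state = (finished tokens, current last token); 'tokens[-1] += char' extends the
-- current token, 'tokens.append(t)' closes it and opens t.
def altStep (s : List (List Char) × List Char) (c : Char) : List (List Char) × List Char :=
  if c == 'R' || c == 'L' then (s.1 ++ [s.2], [c])
  else if c == ',' then (s.1 ++ [s.2], [])
  else (s.1, s.2 ++ [c])

def read_instructions_alt (instructions : String) : List String :=
  let fin := instructions.toList.foldl altStep ([], ['R'])
  (fin.1 ++ [fin.2]).map String.ofList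

-- ===== PRECONDITION & SPEC =====
def Spec_read_instructions (instructions : String) (out : List String) : Prop := out = read_instructions_alt instructions
instance (instructions : String) (out : List String) : Decidable (Spec_read_instructions instructions out) := by unfold Spec_read_instructions; infer_instance

-- ===== CLAIM (what is proved, stated in full; the proofs are below) =====
def Claim_equal_read_instructions : Prop := ∀ (instructions : String), Dom_read_instructions instructions → Spec_read_instructions instructions (read_instructions instructions)

-- ===== LEMMAS AND PROOFS =====

-- splitting a character list on ',' the direct way
def tok : List Char → List Char → List (List Char)
  | cur, [] => [cur]
  | cur, c :: rest => if c == ',' then cur :: tok [] rest else tok (cur ++ [c]) rest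

-- what A's loop contributes to the buffer for one input character
def enc (c : Char) : List Char := if c == 'R' || c == 'L' then [',', c] else [c]

theorem go_spec : ∀ (fuel : Nat) (l cur : List Char) (acc : List (List Char)), l.length < fuel →
    PySem.Chars.splitOn.go [','] fuel l cur acc = acc.reverse ++ tok cur.reverse l := by
  intro fuel
  induction fuel with
  | zero => intro l cur acc h; omega
  | succ n ih =>
    intro l cur acc h
    cases l with
    | nil => simp [PySem.Chars.splitOn.go, tok]
    | cons c rest =>
      by_cases hc : c = ','
      · subst hc
        have hpre : [','].isPrefixOf (',' :: rest) = true := by simp [List.isPrefixOf]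
        simp only [PySem.Chars.splitOn.go, hpre, if_pos]
        rw [ih (List.drop [','].length (',' :: rest)) [] (cur.reverse :: acc)
            (by simp at h ⊢; omega)]
        simp [tok]
      · have hpre : [','].isPrefixOf (c :: rest) = false := by
          simp [List.isPrefixOf]
          exact fun hh => hc hh.symm
        simp only [PySem.Chars.splitOn.go, hpre, Bool.false_eq_true, if_false]
        rw [ih rest (c :: cur) acc (by simp at h ⊢; omega)]
        simp [tok, hc]

theorem splitOn_eq_tok (l : List Char) : PySem.Chars.splitOn l [','] = tok [] l := by
  rw [PySem.Chars.splitOn.eq_def, go_spec (l.length + 1) l [] [] (by omega)]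
  simp

theorem fold_tok : ∀ (cs : List Char) (done : List (List Char)) (cur : List Char),
    (cs.foldl altStep (done, cur)).1 ++ [(cs.foldl altStep (done, cur)).2]
      = done ++ tok cur (cs.flatMap enc) := by
  intro cs
  induction cs with
  | nil => intro done cur; simp [tok]
  | cons c rest ih =>
    intro done cur
    rw [List.foldl_cons, List.flatMap_cons]
    by_cases hRL : (c == 'R' || c == 'L') = true
    · have hc : ¬ c = ',' := by
        rcases Bool.or_eq_true_iff.mp hRL with h | h <;> simp_all
      rw [show altStep (done, cur) c = (done ++ [cur], [c]) from by simp [altStep, hRL]]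
      rw [ih]
      simp [enc, tok, hRL, hc]
    · by_cases hc : c = ','
      · subst hc
        rw [show altStep (done, cur) ',' = (done ++ [cur], []) from by
          simp [altStep]]
        rw [ih]
        simp [enc, tok]
      · rw [show altStep (done, cur) c = (done, cur ++ [c]) from by
          simp [altStep, hRL, hc]]
        rw [ih]
        simp [enc, tok, hRL, hc]

theorem buf_eq (cs : List Char) :
    cs.foldl (fun acc c => (if c == 'R' || c == 'L' then acc ++ [','] else acc) ++ [c]) ['R']
      = 'R' :: cs.flatMap enc := by
  rw [PySem.List.foldl_congr_mem cs _ (fun acc c => acc ++ enc c) ['R']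
      (by intro acc x _; unfold enc; by_cases h : (x == 'R' || x == 'L') = true <;> simp [h])]
  rw [PySem.List.foldl_append_eq_flatMap]
  rfl

-- ===== VERDICT (by name: the statement is the Claim_ definition above) =====
theorem read_instructions_spec : Claim_equal_read_instructions := by
  intro instructions _
  unfold Spec_read_instructions read_instructions read_instructions_alt
  rw [PySem.Str.len_eq]
  dsimp only
  rw [PySem.List.foldl_pyRange_zero_pyGetD' instructions.toList ' '
      (fun acc c => (if c == 'R' || c == 'L' then acc ++ [','] else acc) ++ [c]) ['R']]
  rw [buf_eq]
  rw [fold_tok instructions.toList [] ['R']]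
  simp only [PySem.Str.split?, PySem.Chars.split?]
  rw [show ("," : String).toList = [','] from by decide]
  simp only [String.toList_ofList, List.isEmpty_cons, Bool.false_eq_true, if_false,
    Option.map_some, Option.getD_some]
  rw [splitOn_eq_tok]
  simp [tok]
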